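-- pv_equiv track=rewrite | github.com/Liqianglab/Code-azoospermia-scRNAseq | supfig5_code/supfig5_source_data.py | pick_panel_a_score_column
-- ===== SOURCE A (Python) =====
-- PANEL_A_META_COLUMNS = {"cell", "Major cell types", "UMAP1", "UMAP2", "TSNE1", "TSNE2"}
--
-- def pick_panel_a_score_column(columns):
--     candidates = [col for col in columns if col not in PANEL_A_META_COLUMNS]
--     if not candidates:
--         return ""
--     if len(candidates) == 1:
--         return candidates[0]
--     preferred = ["Luteinizing hormone.csv", "steroid metabolism.csv", "Glucocorticoid receptor pathway"]
--     for item in preferred: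
--         if item in candidates:
--             return item
--     return candidates[0]
-- ===== SOURCE B (Python) =====
-- PANEL_A_META_COLUMNS = {"cell", "Major cell types", "UMAP1", "UMAP2", "TSNE1", "TSNE2"}
--
-- PREFERRED = ["Luteinizing hormone.csv", "steroid metabolism.csv", "Glucocorticoid receptor pathway"]
--
--
-- def pick_panel_a_score_column(columns):
--     candidates = [col for col in columns if col not in PANEL_A_META_COLUMNS]
--     if not candidates:
--         return ""
--     rank = {name: i for i, name in enumerate(PREFERRED)}
--     return min(candidates, key=lambda c: rank.get(c, len(PREFERRED)))
-- ===== Notes on version B (the rewrite author's own statement) =====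
-- stated objective: alternative
-- what changed: Instead of A's early-return scan over the preferred list (plus a redundant single-candidate branch), B builds a name->index rank map once and returns min(candidates, key=rank), relying on min's first-on-tie rule to give both the preference-order choice and the first-candidate fallback.
import Mathlib
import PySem

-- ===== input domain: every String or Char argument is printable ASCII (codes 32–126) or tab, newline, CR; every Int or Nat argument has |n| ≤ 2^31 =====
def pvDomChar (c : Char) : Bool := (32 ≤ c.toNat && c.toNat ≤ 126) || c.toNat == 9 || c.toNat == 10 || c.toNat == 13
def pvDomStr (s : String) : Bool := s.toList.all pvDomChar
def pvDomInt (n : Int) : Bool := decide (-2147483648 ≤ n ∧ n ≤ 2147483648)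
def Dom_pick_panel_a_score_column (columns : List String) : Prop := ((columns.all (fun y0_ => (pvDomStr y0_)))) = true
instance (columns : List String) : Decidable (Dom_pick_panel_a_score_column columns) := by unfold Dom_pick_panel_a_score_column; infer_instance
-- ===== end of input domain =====

-- B replaces A's short-circuit scan over the preferred list by a single min-by-rank
-- pass over the candidates (objective: alternative decomposition, same cost).

-- ===== PORT A =====
def panelAMeta : PySem.Set String :=
  PySem.Set.ofList ["cell", "Major cell types", "UMAP1", "UMAP2", "TSNE1", "TSNE2"]

def preferredList : List String :=
  ["Luteinizing hormone.csv", "steroid metabolism.csv", "Glucocorticoid receptor pathway"]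

-- A's 'for item in preferred: if item in candidates: return item' loop
def pickLoop : List String → List String → Option String
  | [], _ => none
  | item :: rest, cands => if item ∈ cands then some item else pickLoop rest cands

def pick_panel_a_score_column (columns : List String) : String :=
  let candidates := columns.filter (fun col => !(PySem.Set.contains panelAMeta col))
  match candidates with
  | [] => ""
  | c :: rest =>
    if rest = [] then c
    else
      match pickLoop preferredList candidates with
      | some item => item
      | none => c

-- ===== PORT B =====
-- rank = {name: i for i, name in enumerate(PREFERRED)}
def rankDict : PySem.Dict String Int :=
  (PySem.List.enumerate preferredList).foldl (fun d p => PySem.Dict.insert d p.2 p.1) PySem.Dict.empty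

-- the key 'lambda c: rank.get(c, len(PREFERRED))' of Source B
def rankKey (c : String) : Int := PySem.Dict.getD rankDict c 3

def pick_panel_a_score_column_alt (columns : List String) : String :=
  let candidates := columns.filter (fun col => !(PySem.Set.contains panelAMeta col))
  match candidates with
  | [] => ""
  | _ =>
    -- min(candidates, key=...); '.getD ""' only totalizes the empty case this branch excludes
    (PySem.List.min? candidates rankKey).getD ""

-- ===== PRECONDITION & SPEC =====
def Spec_pick_panel_a_score_column (columns : List String) (out : String) : Prop := out = pick_panel_a_score_column_alt columns
instance (columns : List String) (out : String) : Decidable (Spec_pick_panel_a_score_column columns out) := by unfold Spec_pick_panel_a_score_column; infer_instance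

-- ===== CLAIM (what is proved, stated in full; the proofs are below) =====
def Claim_equal_pick_panel_a_score_column : Prop := ∀ (columns : List String), Dom_pick_panel_a_score_column columns → Spec_pick_panel_a_score_column columns (pick_panel_a_score_column columns)

-- ===== LEMMAS AND PROOFS =====
set_option maxHeartbeats 1000000

lemma rankKey_char (c : String) :
    rankKey c = if c = "Luteinizing hormone.csv" then 0
      else if c = "steroid metabolism.csv" then 1
      else if c = "Glucocorticoid receptor pathway" then 2 else 3 := by
  have h : rankDict = PySem.Dict.mk
      [("Luteinizing hormone.csv", 0), ("steroid metabolism.csv", 1),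
        ("Glucocorticoid receptor pathway", 2)] := by rfl
  simp only [rankKey, PySem.Dict.getD, h, PySem.Dict.get?_mk_cons]
  split_ifs <;> simp_all [PySem.Dict.get?]

-- the running-minimum fold of min? keeps the first key-minimal element
lemma fold_min_loop (f : Option String → String → Option String)
    (hf : ∀ m x, f (some m) x = if rankKey x < rankKey m then some x else some m)
    (xs : List String) (m : String) :
    xs.foldl f (some m)
      = some (
        if "Luteinizing hormone.csv" ∈ xs ∧ 0 < rankKey m then "Luteinizing hormone.csv"
        else if "steroid metabolism.csv" ∈ xs ∧ 1 < rankKey m then "steroid metabolism.csv"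
        else if "Glucocorticoid receptor pathway" ∈ xs ∧ 2 < rankKey m then "Glucocorticoid receptor pathway"
        else m) := by
  induction xs generalizing m with
  | nil => simp
  | cons x xs ih =>
    simp only [List.foldl_cons, List.mem_cons, hf]
    have hx := rankKey_char x
    have hm := rankKey_char m
    by_cases hxm : rankKey x < rankKey m
    · rw [if_pos hxm, ih]
      clear ih hf
      split_ifs at hx hm ⊢ <;> simp_all
    · rw [if_neg hxm, ih]
      clear ih hf
      split_ifs at hx hm ⊢ <;> simp_all

lemma min?_char (c : String) (rest : List String) :
    PySem.List.min? (c :: rest) rankKey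
      = some (
        if "Luteinizing hormone.csv" ∈ rest ∧ 0 < rankKey c then "Luteinizing hormone.csv"
        else if "steroid metabolism.csv" ∈ rest ∧ 1 < rankKey c then "steroid metabolism.csv"
        else if "Glucocorticoid receptor pathway" ∈ rest ∧ 2 < rankKey c then "Glucocorticoid receptor pathway"
        else c) := by
  simp only [PySem.List.min?, List.foldl_cons]
  exact fold_min_loop _ (fun m x => rfl) rest c

-- ===== VERDICT (by name: the statement is the Claim_ definition above) =====
theorem pick_panel_a_score_column_spec : Claim_equal_pick_panel_a_score_column := by
  intro columns _
  show pick_panel_a_score_column columns = pick_panel_a_score_column_alt columns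
  unfold pick_panel_a_score_column pick_panel_a_score_column_alt
  cases hc : columns.filter (fun col => !(PySem.Set.contains panelAMeta col)) with
  | nil => rfl
  | cons c rest =>
    dsimp only
    rw [min?_char]
    simp only [pickLoop, preferredList, List.mem_cons, Option.getD_some]
    have hcc := rankKey_char c
    by_cases hr : rest = [] <;>
      split_ifs at hcc ⊢ <;> simp_all
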